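-- pv_equiv track=rewrite | github.com/gpark31/music1 | musicrecplus.py | findBestUser
-- ===== SOURCE A (Python) =====
-- def findBestUser(currUser, prefs, userMap):
--     ''' Find the user whose tastes are closest to the current
--         user.  Return the best user's name (a string) '''
--     users = userMap.keys()
--     bestUser = None
--     bestScore = -1
--     for user in users:
--         score = numMatches(prefs, userMap[user])
--         if score > bestScore and currUser != user:
--             bestScore = score
--             bestUser = user
--     return bestUser
--
-- def numMatches( list1, list2 ):
--     ''' return the number of elements that match between
--         two sorted lists '''
--     matches = 0
--     i = 0
--     j = 0
--     while i < len(list1) and j < len(list2):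
--         if list1[i] == list2[j]:
--             matches += 1
--             i += 1
--             j += 1
--         elif list1[i] < list2[j]:
--             i += 1
--         else:
--             j += 1
--     return matches
-- ===== SOURCE B (Python) =====
-- def findBestUser(currUser, prefs, userMap):
--     ''' Find the user whose tastes are closest to the current
--         user.  Return the best user's name (a string) '''
--     others = [user for user in userMap if user != currUser]
--     if not others:
--         return None
--     return max(others,
--                key=lambda user: len(prefs) + len(userMap[user])
--                                 - len(mergeUnion(prefs, userMap[user])))
--
--
-- def mergeUnion(a, b):
--     ''' merge the two lists into one, emitting a single copy when the
--         two current heads coincide; the match count then falls out by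
--         inclusion-exclusion as len(a) + len(b) - len(merged union) '''
--     s1, s2 = list(reversed(a)), list(reversed(b))
--     out = []
--     while s1 and s2:
--         if s1[-1] == s2[-1]:
--             out.append(s1.pop())
--             s2.pop()
--         elif s1[-1] < s2[-1]:
--             out.append(s1.pop())
--         else:
--             out.append(s2.pop())
--     out.extend(reversed(s1))
--     out.extend(reversed(s2))
--     return out
-- ===== Notes on version B (the rewrite author's own statement) =====
-- stated objective: alternative
-- what changed: The match count is no longer tallied by a two-pointer counting merge: B materialises the merged union of the two lists (a stack-based merge that emits one copy when the heads coincide) and derives the score by inclusion-exclusion as len(a)+len(b)-len(union), and the manual bestUser/bestScore accumulator loop becomes a filter of the non-current users plus max with a key (whose first-maximal tie-break matches A's strict > update).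
import Mathlib
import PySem

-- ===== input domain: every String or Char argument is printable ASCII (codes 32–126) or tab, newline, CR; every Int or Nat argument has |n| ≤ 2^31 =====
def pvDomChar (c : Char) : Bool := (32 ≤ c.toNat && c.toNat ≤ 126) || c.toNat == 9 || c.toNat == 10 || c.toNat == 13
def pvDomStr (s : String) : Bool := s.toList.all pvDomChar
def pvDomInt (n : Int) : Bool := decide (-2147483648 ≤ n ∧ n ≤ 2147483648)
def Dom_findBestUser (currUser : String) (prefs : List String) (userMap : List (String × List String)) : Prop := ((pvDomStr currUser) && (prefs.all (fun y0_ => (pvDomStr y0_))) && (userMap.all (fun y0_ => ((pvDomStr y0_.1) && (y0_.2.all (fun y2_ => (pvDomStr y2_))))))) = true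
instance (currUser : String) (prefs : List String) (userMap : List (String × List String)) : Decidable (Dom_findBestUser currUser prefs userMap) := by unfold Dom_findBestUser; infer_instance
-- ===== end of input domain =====

-- B derives each score by inclusion-exclusion from the length of an explicitly built merged
-- union of the two lists instead of A's two-pointer counting merge, and replaces A's manual
-- best-tracking loop by filter + max-with-key; objective: alternative (same asymptotic cost).

-- ===== PORT A =====
-- while i < len(list1) and j < len(list2): …  (two int indices, accumulator `matches`;
-- the Nat fuel is only a structural totality guard: len(list1)+len(list2) steps always suffice)
def numMatchesFuel : Nat → List String → List String → Nat → Nat → Int → Int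
  | 0, _, _, _, _, m => m
  | fuel+1, l1, l2, i, j, m =>
    if h : i < l1.length ∧ j < l2.length then
      if l1[i] = l2[j] then numMatchesFuel fuel l1 l2 (i+1) (j+1) (m+1)
      else if l1[i] < l2[j] then numMatchesFuel fuel l1 l2 (i+1) j m
      else numMatchesFuel fuel l1 l2 i (j+1) m
    else m

def numMatches (list1 list2 : List String) : Int :=
  numMatchesFuel (list1.length + list2.length) list1 list2 0 0 0

def findBestUser (currUser : String) (prefs : List String) (userMap : List (String × List String)) : Option String :=
  let d := PySem.Dict.mk userMap
  let users := d.keys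
  let res := users.foldl
    (fun (acc : Option String × Int) user =>
      let score := numMatches prefs (d.getD user [])
      if score > acc.2 ∧ currUser ≠ user then (some user, score) else acc)
    (none, -1)
  res.1

-- ===== PORT B =====
-- Source B's mergeUnion: two stacks holding the reversed lists, popped from the top, the merged
-- union appended to `out`; the port keeps each stack as the not-yet-popped part in ORIGINAL
-- order (s[-1] of the reversed stack = head here) and `out` as the same growing accumulator,
-- with `out.extend(reversed(s1)); out.extend(reversed(s2))` becoming `out ++ s1 ++ s2`
def unionGo : List String → List String → List String → List String
  | [], s2, out => out ++ s2
  | x :: t1, [], out => out ++ x :: t1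
  | x :: t1, y :: t2, out =>
    if x = y then unionGo t1 t2 (out ++ [x])
    else if x < y then unionGo t1 (y :: t2) (out ++ [x])
    else unionGo (x :: t1) t2 (out ++ [y])
termination_by s1 s2 _ => s1.length + s2.length

def mergeUnion (a b : List String) : List String := unionGo a b []

def findBestUser_alt (currUser : String) (prefs : List String) (userMap : List (String × List String)) : Option String :=
  let d := PySem.Dict.mk userMap
  let others := d.keys.filter (fun user => user ≠ currUser)
  PySem.List.max? others
    (fun user => (prefs.length : Int) + ((d.getD user []).length : Int)
                 - ((mergeUnion prefs (d.getD user [])).length : Int))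

-- ===== PRECONDITION & SPEC =====
def Spec_findBestUser (currUser : String) (prefs : List String) (userMap : List (String × List String)) (out : Option String) : Prop := out = findBestUser_alt currUser prefs userMap
instance (currUser : String) (prefs : List String) (userMap : List (String × List String)) (out : Option String) : Decidable (Spec_findBestUser currUser prefs userMap out) := by unfold Spec_findBestUser; infer_instance

-- ===== CLAIM (what is proved, stated in full; the proofs are below) =====
def Claim_equal_findBestUser : Prop := ∀ (currUser : String) (prefs : List String) (userMap : List (String × List String)), Dom_findBestUser currUser prefs userMap → Spec_findBestUser currUser prefs userMap (findBestUser currUser prefs userMap)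

-- ===== LEMMAS AND PROOFS =====

-- structural restatement of A's index loop (proof helper only): the merge walk on the suffixes
def matchGo : Nat → List String → List String → Int → Int
  | 0, _, _, m => m
  | _+1, [], _, m => m
  | _+1, _ :: _, [], m => m
  | fuel+1, x :: t1, y :: t2, m =>
    if x = y then matchGo fuel t1 t2 (m+1)
    else if x < y then matchGo fuel t1 (y :: t2) m
    else matchGo fuel (x :: t1) t2 m

theorem matchGo_nil (f : Nat) (l1 l2 : List String) (m : Int)
    (h : l1 = [] ∨ l2 = []) : matchGo f l1 l2 m = m := by
  cases f with
  | zero => rfl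
  | succ f =>
    rcases h with h | h
    · subst h; rfl
    · subst h; cases l1 <;> rfl

-- the match accumulator only ever adds to the result
theorem matchGo_acc (f : Nat) : ∀ (l1 l2 : List String) (m : Int),
    matchGo f l1 l2 m = m + matchGo f l1 l2 0 := by
  induction f with
  | zero => intro l1 l2 m; simp [matchGo]
  | succ f ih =>
    intro l1 l2 m
    match l1, l2 with
    | [], l2 => simp [matchGo]
    | x :: t1, [] => simp [matchGo]
    | x :: t1, y :: t2 =>
      by_cases h : x = y
      · simp only [matchGo, if_pos h]
        rw [ih t1 t2 (m + 1), ih t1 t2 (0 + 1)]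
        ring
      · by_cases h2 : x < y
        · simp only [matchGo, if_neg h, if_pos h2]
          exact ih t1 (y :: t2) m
        · simp only [matchGo, if_neg h, if_neg h2]
          exact ih (x :: t1) t2 m

theorem matchGo_nonneg (f : Nat) : ∀ (l1 l2 : List String), 0 ≤ matchGo f l1 l2 0 := by
  induction f with
  | zero => intro l1 l2; simp [matchGo]
  | succ f ih =>
    intro l1 l2
    match l1, l2 with
    | [], l2 => simp [matchGo]
    | x :: t1, [] => simp [matchGo]
    | x :: t1, y :: t2 =>
      by_cases h : x = y
      · simp only [matchGo, if_pos h]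
        rw [matchGo_acc]
        have := ih t1 t2
        omega
      · by_cases h2 : x < y
        · simp only [matchGo, if_neg h, if_pos h2]
          exact ih t1 (y :: t2)
        · simp only [matchGo, if_neg h, if_neg h2]
          exact ih (x :: t1) t2

-- A's index loop computes the structural walk on the corresponding suffixes,
-- for any sufficient amounts of fuel
theorem numMatchesFuel_eq (fA : Nat) : ∀ (fB : Nat) (l1 l2 : List String) (i j : Nat) (m : Int),
    (l1.length - i) + (l2.length - j) ≤ fA →
    (l1.length - i) + (l2.length - j) ≤ fB →
    numMatchesFuel fA l1 l2 i j m = matchGo fB (l1.drop i) (l2.drop j) m := by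
  induction fA with
  | zero =>
    intro fB l1 l2 i j m hA hB
    rw [matchGo_nil fB _ _ m (Or.inl (List.drop_of_length_le (by omega)))]
    rfl
  | succ fA ih =>
    intro fB l1 l2 i j m hA hB
    rw [numMatchesFuel]
    split
    · rename_i h
      obtain ⟨h1, h2⟩ := h
      cases fB with
      | zero => omega
      | succ fB =>
        rw [List.drop_eq_getElem_cons h1, List.drop_eq_getElem_cons h2]
        by_cases he : l1[i] = l2[j]
        · simp only [matchGo, if_pos he]
          have := ih fB l1 l2 (i + 1) (j + 1) (m + 1) (by omega) (by omega)
          rw [this]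
        · by_cases hlt : l1[i] < l2[j]
          · simp only [matchGo, if_neg he, if_pos hlt]
            rw [ih fB l1 l2 (i + 1) j m (by omega) (by omega),
              List.drop_eq_getElem_cons h2]
          · simp only [matchGo, if_neg he, if_neg hlt]
            rw [ih fB l1 l2 i (j + 1) m (by omega) (by omega),
              List.drop_eq_getElem_cons h1]
    · rename_i h
      by_cases h1 : i < l1.length
      · have h2 : l2.length ≤ j := by by_contra hc; exact h ⟨h1, by omega⟩
        rw [matchGo_nil fB _ _ m (Or.inr (List.drop_of_length_le h2))]
      · rw [matchGo_nil fB _ _ m (Or.inl (List.drop_of_length_le (by omega)))]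

-- B's union accumulator is append-only
theorem unionGo_acc (n : Nat) : ∀ (s1 s2 : List String), s1.length + s2.length ≤ n →
    ∀ out, unionGo s1 s2 out = out ++ unionGo s1 s2 [] := by
  induction n with
  | zero =>
    intro s1 s2 h out
    have h1 : s1 = [] := by cases s1 <;> simp_all
    subst h1
    simp [unionGo]
  | succ n ih =>
    intro s1 s2 h out
    match s1, s2 with
    | [], s2 => simp [unionGo]
    | x :: t1, [] => simp [unionGo]
    | x :: t1, y :: t2 =>
      by_cases he : x = y
      · rw [unionGo, unionGo, if_pos he, if_pos he,
          ih t1 t2 (by simp at h ⊢; omega) (out ++ [x]),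
          ih t1 t2 (by simp at h ⊢; omega) ([] ++ [x])]
        simp
      · by_cases hlt : x < y
        · rw [unionGo, unionGo, if_neg he, if_neg he, if_pos hlt, if_pos hlt,
            ih t1 (y :: t2) (by simp at h ⊢; omega) (out ++ [x]),
            ih t1 (y :: t2) (by simp at h ⊢; omega) ([] ++ [x])]
          simp
        · rw [unionGo, unionGo, if_neg he, if_neg he, if_neg hlt, if_neg hlt,
            ih (x :: t1) t2 (by simp at h ⊢; omega) (out ++ [y]),
            ih (x :: t1) t2 (by simp at h ⊢; omega) ([] ++ [y])]
          simp

-- inclusion-exclusion: A's match count + the merged union's length = the two lengths' sum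
theorem matchGo_union (f : Nat) : ∀ (l1 l2 : List String),
    l1.length + l2.length ≤ f →
    matchGo f l1 l2 0 = (l1.length : Int) + (l2.length : Int) - ((mergeUnion l1 l2).length : Int) := by
  induction f with
  | zero =>
    intro l1 l2 h
    have h1 : l1 = [] := by cases l1 <;> simp_all
    have h2 : l2 = [] := by cases l2 <;> simp_all
    subst h1; subst h2
    simp [matchGo, mergeUnion, unionGo]
  | succ f ih =>
    intro l1 l2 h
    match l1, l2 with
    | [], l2 => simp [matchGo, mergeUnion, unionGo]
    | x :: t1, [] => simp [matchGo, mergeUnion, unionGo]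
    | x :: t1, y :: t2 =>
      by_cases he : x = y
      · rw [show matchGo (f+1) (x::t1) (y::t2) 0 = matchGo f t1 t2 (0+1) by
            simp only [matchGo, if_pos he]]
        rw [matchGo_acc, ih t1 t2 (by simp at h ⊢; omega)]
        have hu : mergeUnion (x::t1) (y::t2) = [x] ++ mergeUnion t1 t2 := by
          rw [mergeUnion, unionGo, if_pos he,
            unionGo_acc (t1.length + t2.length) t1 t2 (by omega) ([] ++ [x])]
          simp [mergeUnion]
        rw [hu]
        simp only [List.length_append, List.length_cons, List.length_nil]
        push_cast
        omega
      · by_cases hlt : x < y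
        · rw [show matchGo (f+1) (x::t1) (y::t2) 0 = matchGo f t1 (y::t2) 0 by
              simp only [matchGo, if_neg he, if_pos hlt]]
          rw [ih t1 (y::t2) (by simp at h ⊢; omega)]
          have hu : mergeUnion (x::t1) (y::t2) = [x] ++ mergeUnion t1 (y::t2) := by
            rw [mergeUnion, unionGo, if_neg he, if_pos hlt,
            unionGo_acc (t1.length + (y::t2).length) t1 (y::t2) (by omega) ([] ++ [x])]
            simp [mergeUnion]
          rw [hu]
          simp only [List.length_append, List.length_cons, List.length_nil]
          push_cast
          omega
        · rw [show matchGo (f+1) (x::t1) (y::t2) 0 = matchGo f (x::t1) t2 0 by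
              simp only [matchGo, if_neg he, if_neg hlt]]
          rw [ih (x::t1) t2 (by simp at h ⊢; omega)]
          have hu : mergeUnion (x::t1) (y::t2) = [y] ++ mergeUnion (x::t1) t2 := by
            rw [mergeUnion, unionGo, if_neg he, if_neg hlt,
            unionGo_acc ((x::t1).length + t2.length) (x::t1) t2 (by omega) ([] ++ [y])]
            simp [mergeUnion]
          rw [hu]
          simp only [List.length_append, List.length_cons, List.length_nil]
          push_cast
          omega

-- A's numMatches equals B's inclusion-exclusion score
theorem numMatches_eq_union (l1 l2 : List String) :
    numMatches l1 l2 = (l1.length : Int) + (l2.length : Int) - ((mergeUnion l1 l2).length : Int) := by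
  rw [numMatches,
    numMatchesFuel_eq (l1.length + l2.length) (l1.length + l2.length) l1 l2 0 0 0
      (by omega) (by omega)]
  simp only [List.drop_zero]
  exact matchGo_union (l1.length + l2.length) l1 l2 (by omega)

theorem union_score_nonneg (l1 l2 : List String) :
    0 ≤ (l1.length : Int) + (l2.length : Int) - ((mergeUnion l1 l2).length : Int) := by
  rw [← numMatches_eq_union, numMatches,
    numMatchesFuel_eq (l1.length + l2.length) (l1.length + l2.length) l1 l2 0 0 0
      (by omega) (by omega)]
  exact matchGo_nonneg _ _ _

-- A's fold with strict-> update and currUser exclusion is max? over the filtered list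
theorem fold_eq_max (currUser : String) (key : String → Int)
    (h0 : ∀ u, 0 ≤ key u) :
    ∀ (os : List String) (p : Option String × Int) (b : Option String),
    (b = none → p = (none, -1)) → (∀ x, b = some x → p = (some x, key x)) →
    (os.foldl
        (fun (acc : Option String × Int) user =>
          if key user > acc.2 ∧ currUser ≠ user then (some user, key user) else acc)
        p).1
      = (os.filter (fun user => user ≠ currUser)).foldl
          (fun acc user =>
            match acc with
            | none => some user
            | some m => if key m < key user then some user else some m)
          b := by
  intro os
  induction os with
  | nil =>
    intro p b hn hs
    cases b with
    | none => rw [hn rfl]; rfl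
    | some x => rw [hs x rfl]; rfl
  | cons u os ih =>
    intro p b hn hs
    by_cases hcu : u = currUser
    · subst hcu
      have hfil : (u :: os).filter (fun user => user ≠ u)
          = os.filter (fun user => user ≠ u) := by
        simp
      rw [hfil, List.foldl_cons]
      rw [if_neg (by simp)]
      exact ih p b hn hs
    · have hne : currUser ≠ u := fun h => hcu h.symm
      have hfil : (u :: os).filter (fun user => user ≠ currUser)
          = u :: os.filter (fun user => user ≠ currUser) := by
        simp [hcu]
      rw [hfil]
      simp only [List.foldl_cons]
      cases b with
      | none =>
        rw [hn rfl]
        rw [if_pos (show key u > ((none : Option String), (-1 : Int)).2 ∧ currUser ≠ u from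
          ⟨show (-1 : Int) < key u by have := h0 u; omega, hne⟩)]
        exact ih (some u, key u) (some u) (by simp) (by intro z hz; cases hz; rfl)
      | some x =>
        rw [hs x rfl]
        by_cases hk : key x < key u
        · rw [if_pos (show key u > ((some x : Option String), key x).2 ∧ currUser ≠ u from
            ⟨hk, hne⟩)]
          have eB : (match (some x : Option String) with
              | none => some u
              | some m => if key m < key u then some u else some m) = some u := by
            simp [hk]
          rw [eB]
          exact ih (some u, key u) (some u) (by simp) (by intro z hz; cases hz; rfl)
        · rw [if_neg (show ¬(key u > ((some x : Option String), key x).2 ∧ currUser ≠ u) from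
            fun hcon => hk hcon.1)]
          have eB : (match (some x : Option String) with
              | none => some u
              | some m => if key m < key u then some u else some m) = some x := by
            simp [hk]
          rw [eB]
          exact ih (some x, key x) (some x) (by simp) (by intro z hz; cases hz; rfl)

-- ===== VERDICT (by name: the statement is the Claim_ definition above) =====
theorem findBestUser_spec : Claim_equal_findBestUser := by
  unfold Claim_equal_findBestUser
  intro currUser prefs userMap _
  unfold Spec_findBestUser findBestUser findBestUser_alt
  simp only [numMatches_eq_union]
  have h := fold_eq_max currUser
    (fun user => (prefs.length : Int) + (((PySem.Dict.mk userMap).getD user []).length : Int)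
                 - ((mergeUnion prefs ((PySem.Dict.mk userMap).getD user [])).length : Int))
    (fun u => union_score_nonneg _ _) (PySem.Dict.keys (PySem.Dict.mk userMap))
    (none, -1) none (fun _ => rfl) (fun x hx => by cases hx)
  rw [h]
  rw [PySem.List.max?]
  congr 1
  funext acc x
  cases acc <;> rfl
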